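-- pv_equiv track=rewrite | github.com/nikolay-e/treemapper | src/treemapper/diffctx/signatures.py | _count_brackets_outside_strings
-- ===== SOURCE A (Python) =====
-- def _count_brackets_outside_strings(line: str) -> tuple[int, int, int, int]:
--     open_parens = 0
--     close_parens = 0
--     open_braces = 0
--     close_braces = 0
--     in_string: str | None = None
--     escaped = False
--     for ch in line:
--         if in_string is not None:
--             if escaped:
--                 escaped = False
--             elif ch == "\\":
--                 escaped = True
--             elif ch == in_string:
--                 in_string = None
--             continue
--         if ch in ("'", '"', "`"):
--             in_string = ch
--             escaped = False
--             continue
--         if ch == "(":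
--             open_parens += 1
--         elif ch == ")":
--             close_parens += 1
--         elif ch == "{":
--             open_braces += 1
--         elif ch == "}":
--             close_braces += 1
--     return open_parens, close_parens, open_braces, close_braces
-- ===== SOURCE B (Python) =====
-- def _count_brackets_outside_strings(line: str) -> tuple[int, int, int, int]:
--     # Phase 1: build the line with string literals stripped out.
--     out = []
--     i = 0
--     n = len(line)
--     while i < n:
--         ch = line[i]
--         i += 1
--         if ch in "'\"`":
--             # skip the string literal: backslash consumes the next char
--             while i < n:
--                 c = line[i]
--                 i += 1
--                 if c == "\\":
--                     i += 1
--                 elif c == ch: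
--                     break
--         else:
--             out.append(ch)
--     s = "".join(out)
--     # Phase 2: four independent counting passes.
--     return (s.count("("), s.count(")"), s.count("{"), s.count("}"))
-- ===== Notes on version B (the rewrite author's own statement) =====
-- stated objective: alternative
-- what changed: Replaced the single-pass five-counter state machine by a two-phase algorithm: first strip string literals (an index-advancing skip loop that consumes backslash-escaped pairs), then count each bracket with four independent str.count passes.
import Mathlib
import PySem

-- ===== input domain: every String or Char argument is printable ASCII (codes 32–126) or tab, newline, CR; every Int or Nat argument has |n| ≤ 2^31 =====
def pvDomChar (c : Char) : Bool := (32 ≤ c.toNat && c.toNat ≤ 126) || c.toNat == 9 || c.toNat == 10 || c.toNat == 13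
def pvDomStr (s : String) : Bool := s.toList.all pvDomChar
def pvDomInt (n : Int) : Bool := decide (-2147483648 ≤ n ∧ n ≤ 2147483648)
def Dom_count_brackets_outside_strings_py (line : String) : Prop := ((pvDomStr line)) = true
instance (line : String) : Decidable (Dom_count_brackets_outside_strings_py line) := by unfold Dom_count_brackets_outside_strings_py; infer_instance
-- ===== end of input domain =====

-- B strips string literals first and then counts each bracket in four independent passes (alternative structure, same cost).


-- ===== PORT A =====
-- literal transliteration of A's for-loop: one recursive step per character, same state
def pvAuxA : List Char → Int → Int → Int → Int → Option Char → Bool → Int × Int × Int × Int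
  | [], op, cp, ob, cb, _, _ => (op, cp, ob, cb)
  | ch :: rest, op, cp, ob, cb, instr, esc =>
    match instr with
    | some q =>
      if esc then pvAuxA rest op cp ob cb (some q) false
      else if ch = '\\' then pvAuxA rest op cp ob cb (some q) true
      else if ch = q then pvAuxA rest op cp ob cb none false
      else pvAuxA rest op cp ob cb (some q) false
    | none =>
      if ch = '\'' ∨ ch = '"' ∨ ch = '`' then pvAuxA rest op cp ob cb (some ch) false
      else if ch = '(' then pvAuxA rest (op + 1) cp ob cb none false
      else if ch = ')' then pvAuxA rest op (cp + 1) ob cb none false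
      else if ch = '{' then pvAuxA rest op cp (ob + 1) cb none false
      else if ch = '}' then pvAuxA rest op cp ob (cb + 1) none false
      else pvAuxA rest op cp ob cb none false

def count_brackets_outside_strings_py (line : String) : Int × Int × Int × Int :=
  pvAuxA line.toList 0 0 0 0 none false

-- ===== PORT B =====
-- inner skip loop of B: consume the string literal opened by quote q, return the rest
def pvSkipStr (q : Char) : List Char → List Char
  | [] => []
  | c :: rest =>
    if c = '\\' then
      match rest with
      | [] => []
      | _ :: r => pvSkipStr q r
    else if c = q then rest
    else pvSkipStr q rest

theorem pvSkipStr_length_le (q : Char) (cs : List Char) : (pvSkipStr q cs).length ≤ cs.length := by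
  induction cs using pvSkipStr.induct q with
  | case1 => simp [pvSkipStr]
  | case2 => simp [pvSkipStr]
  | case3 head r ih => rw [pvSkipStr.eq_def]; simp; omega
  | case4 r h => rw [pvSkipStr.eq_def]; simp [h]
  | case5 head r h1 h2 ih => rw [pvSkipStr.eq_def]; simp [h1, h2]; omega

-- outer loop of B: the line with its string literals removed
def pvStrip : List Char → List Char
  | [] => []
  | c :: rest =>
    if c = '\'' ∨ c = '"' ∨ c = '`' then pvStrip (pvSkipStr c rest)
    else c :: pvStrip rest
termination_by cs => cs.length
decreasing_by
  · exact Nat.lt_succ_of_le (pvSkipStr_length_le _ _)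
  · simp

def count_brackets_outside_strings_py_alt (line : String) : Int × Int × Int × Int :=
  let s := pvStrip line.toList
  ((s.count '(' : Int), (s.count ')' : Int), (s.count '{' : Int), (s.count '}' : Int))

-- ===== PRECONDITION & SPEC =====
def Spec_count_brackets_outside_strings_py (line : String) (out : Int × Int × Int × Int) : Prop := out = count_brackets_outside_strings_py_alt line
instance (line : String) (out : Int × Int × Int × Int) : Decidable (Spec_count_brackets_outside_strings_py line out) := by unfold Spec_count_brackets_outside_strings_py; infer_instance

-- ===== CLAIM (what is proved, stated in full; the proofs are below) =====
def Claim_equal_count_brackets_outside_strings_py : Prop := ∀ (line : String), Dom_count_brackets_outside_strings_py line → Spec_count_brackets_outside_strings_py line (count_brackets_outside_strings_py line)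

-- ===== LEMMAS AND PROOFS =====

-- A's in-string automaton consumes exactly the characters pvSkipStr skips
theorem pvAuxA_instr (q : Char) (cs : List Char) (op cp ob cb : Int) :
    pvAuxA cs op cp ob cb (some q) false = pvAuxA (pvSkipStr q cs) op cp ob cb none false := by
  induction cs using pvSkipStr.induct q generalizing op cp ob cb with
  | case1 => simp [pvAuxA, pvSkipStr]
  | case2 => simp [pvAuxA, pvSkipStr]
  | case3 head r ih => rw [pvSkipStr.eq_def]; simp [pvAuxA, ih]
  | case4 r h => rw [pvSkipStr.eq_def]; simp [pvAuxA, h]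
  | case5 head r h1 h2 ih => rw [pvSkipStr.eq_def]; simp [pvAuxA, h1, h2, ih]

-- main invariant: A's counters plus the counts over the stripped rest
theorem pvAuxA_none (cs : List Char) (op cp ob cb : Int) :
    pvAuxA cs op cp ob cb none false =
      (op + ((pvStrip cs).count '(' : Int), cp + ((pvStrip cs).count ')' : Int),
       ob + ((pvStrip cs).count '{' : Int), cb + ((pvStrip cs).count '}' : Int)) := by
  induction cs using pvStrip.induct generalizing op cp ob cb with
  | case1 => simp [pvAuxA, pvStrip]
  | case2 c rest hq ih =>
      simp only [pvAuxA, pvStrip, if_pos hq]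
      rw [pvAuxA_instr]
      exact ih op cp ob cb
  | case3 c rest hq ih =>
      simp only [pvAuxA, pvStrip, if_neg hq]
      split_ifs with hp hcp hob hcb
      · rw [ih]; simp [hp, Prod.ext_iff]; all_goals omega
      · rw [ih]; simp [hcp, Prod.ext_iff]; all_goals omega
      · rw [ih]; simp [hob, Prod.ext_iff]; all_goals omega
      · rw [ih]; simp [hcb, Prod.ext_iff]; all_goals omega
      · rw [ih]; simp [hp, hcp, hob, hcb]

-- ===== VERDICT (by name: the statement is the Claim_ definition above) =====
theorem count_brackets_outside_strings_py_spec : Claim_equal_count_brackets_outside_strings_py := by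
  intro line _
  unfold Spec_count_brackets_outside_strings_py count_brackets_outside_strings_py count_brackets_outside_strings_py_alt
  rw [pvAuxA_none]
  simp
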